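-- pv_equiv track=rewrite | github.com/therealityreport/trr-backend | trr_backend/integrations/imdb/person_gallery.py | _split_srcset
-- ===== SOURCE A (Python) =====
-- def _split_srcset(srcset: str) -> list[str]:
--     raw = srcset or ""
--     parts: list[str] = []
--     buf: list[str] = []
--     i = 0
--     length = len(raw)
--     while i < length:
--         ch = raw[i]
--         if ch == ",":
--             j = i + 1
--             while j < length and raw[j].isspace():
--                 j += 1
--             lookahead = raw[j : j + 8].lower()
--             if lookahead.startswith("http://") or lookahead.startswith("https://") or lookahead.startswith("//"):
--                 part = "".join(buf).strip()
--                 if part: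
--                     parts.append(part)
--                 buf = []
--                 i += 1
--                 continue
--         buf.append(ch)
--         i += 1
--     tail = "".join(buf).strip()
--     if tail:
--         parts.append(tail)
--     return parts
-- ===== SOURCE B (Python) =====
-- def _split_srcset(srcset: str) -> list[str]:
--     raw = srcset or ""
--     segments = raw.split(",")
--     parts: list[str] = []
--     current = segments[0]
--     for seg in segments[1:]:
--         head = seg.lstrip()[:8].lower()
--         if head.startswith("http://") or head.startswith("https://") or head.startswith("//"):
--             part = current.strip()
--             if part:
--                 parts.append(part)
--             current = seg
--         else:
--             current = current + "," + seg
--     tail = current.strip()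
--     if tail:
--         parts.append(tail)
--     return parts
-- ===== Notes on version B (the rewrite author's own statement) =====
-- stated objective: faster
-- what changed: B replaces A's character-by-character index loop with explicit whitespace-skipping lookahead by a single split on commas followed by one pass over the segments that merges a segment back when it does not start (after lstrip, lowercased) with a URL scheme.
import Mathlib
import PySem

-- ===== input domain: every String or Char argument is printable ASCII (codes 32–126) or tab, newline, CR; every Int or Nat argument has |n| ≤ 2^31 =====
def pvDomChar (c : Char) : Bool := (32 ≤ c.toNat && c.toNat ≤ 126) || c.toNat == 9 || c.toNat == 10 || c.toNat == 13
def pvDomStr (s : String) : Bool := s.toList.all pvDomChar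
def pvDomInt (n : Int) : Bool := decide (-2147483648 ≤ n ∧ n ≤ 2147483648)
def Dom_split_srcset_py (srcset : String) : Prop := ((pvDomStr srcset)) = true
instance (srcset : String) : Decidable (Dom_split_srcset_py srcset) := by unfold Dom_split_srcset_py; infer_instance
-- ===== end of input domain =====

-- B replaces A's character-by-character scan by split-on-comma plus a merge pass; equivalence is total.

-- shared URL-scheme test: both Pythons contain the identical three startswith checks
def pvSw (look : List Char) : Bool :=
  PySem.Chars.startswith look "http://".toList ||
  PySem.Chars.startswith look "https://".toList ||
  PySem.Chars.startswith look "//".toList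

-- ===== PORT A =====
-- inner `while j < length and raw[j].isspace(): j += 1`
def pvSkipWs (raw : List Char) (j : Nat) : Nat :=
  if h : j < raw.length then
    if PySem.Chars.isspace raw[j] then pvSkipWs raw (j + 1) else j
  else j
termination_by raw.length - j

-- the outer `while i < length` loop, state (parts, buf); the tail flush is the i ≥ length branch
def pvALoop (raw : List Char) (i : Nat) (parts : List String) (buf : List Char) : List String :=
  if h : i < raw.length then
    let ch := raw[i]
    if ch = ',' then
      let j := pvSkipWs raw (i + 1)
      let lookahead := PySem.Chars.lower (PySem.List.slice raw (some (j : Int)) (some ((j : Int) + 8)))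
      if pvSw lookahead then
        let part := PySem.Chars.strip buf
        pvALoop raw (i + 1) (if part = [] then parts else parts ++ [String.ofList part]) []
      else
        pvALoop raw (i + 1) parts (buf ++ [ch])
    else
      pvALoop raw (i + 1) parts (buf ++ [ch])
  else
    let tail := PySem.Chars.strip buf
    if tail = [] then parts else parts ++ [String.ofList tail]
termination_by raw.length - i

def split_srcset_py (srcset : String) : List String :=
  pvALoop srcset.toList 0 [] []

-- ===== PORT B =====
-- raw.split(",") (str.split with a one-char separator), ported by hand
def pvSplitComma (cs : List Char) : List (List Char) :=
  match cs with
  | [] => [[]]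
  | c :: rest =>
    if c = ',' then [] :: pvSplitComma rest
    else
      match pvSplitComma rest with
      | [] => [[c]]   -- unreachable: pvSplitComma never returns []
      | s :: ss => (c :: s) :: ss

-- seg.lstrip()[:8].lower() starts with a URL scheme
def pvChk (seg : List Char) : Bool :=
  pvSw (PySem.Chars.lower (PySem.List.slice (PySem.Chars.lstrip seg) none (some 8)))

-- the `for seg in segments[1:]` loop plus the final flush
def pvBLoop (segs : List (List Char)) (parts : List String) (current : List Char) : List String :=
  match segs with
  | [] =>
    let tail := PySem.Chars.strip current
    if tail = [] then parts else parts ++ [String.ofList tail]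
  | seg :: rest =>
    if pvChk seg then
      let part := PySem.Chars.strip current
      pvBLoop rest (if part = [] then parts else parts ++ [String.ofList part]) seg
    else
      pvBLoop rest parts (current ++ ',' :: seg)

def split_srcset_py_alt (srcset : String) : List String :=
  match pvSplitComma srcset.toList with
  | [] => []   -- unreachable: str.split never returns an empty list
  | s0 :: rest => pvBLoop rest [] s0

-- ===== PRECONDITION & SPEC =====
def Spec_split_srcset_py (srcset : String) (out : List String) : Prop := out = split_srcset_py_alt srcset
instance (srcset : String) (out : List String) : Decidable (Spec_split_srcset_py srcset out) := by unfold Spec_split_srcset_py; infer_instance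

-- ===== CLAIM (what is proved, stated in full; the proofs are below) =====
def Claim_equal_split_srcset_py : Prop := ∀ (srcset : String), Dom_split_srcset_py srcset → Spec_split_srcset_py srcset (split_srcset_py srcset)

-- ===== LEMMAS AND PROOFS =====

-- boundary test seen from the raw stream: what A computes after a comma
def pvChkStream (x : List Char) : Bool :=
  pvSw (PySem.Chars.lower (List.take 8 (List.dropWhile PySem.Chars.isspace x)))

-- common reference loop: a structural recursion over the raw character list
def pvRef (cs : List Char) (parts : List String) (buf : List Char) : List String :=
  match cs with
  | [] =>
    let tail := PySem.Chars.strip buf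
    if tail = [] then parts else parts ++ [String.ofList tail]
  | c :: rest =>
    if c = ',' && pvChkStream rest then
      let part := PySem.Chars.strip buf
      pvRef rest (if part = [] then parts else parts ++ [String.ofList part]) []
    else
      pvRef rest parts (buf ++ [c])

theorem pvChk_eq (seg : List Char) : pvChk seg = pvChkStream seg := by
  simp [pvChk, pvChkStream, PySem.Chars.lstrip, PySem.List.slice_to]

theorem pvSkipWs_drop (raw : List Char) (j : Nat) :
    List.drop (pvSkipWs raw j) raw = List.dropWhile PySem.Chars.isspace (List.drop j raw) := by
  unfold pvSkipWs
  split
  · next h =>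
    by_cases hs : PySem.Chars.isspace raw[j] = true
    · rw [if_pos hs, pvSkipWs_drop raw (j + 1), List.drop_eq_getElem_cons h,
        List.dropWhile_cons, if_pos hs]
    · rw [if_neg hs, List.drop_eq_getElem_cons h, List.dropWhile_cons, if_neg hs]
  · next h =>
    have hj : raw.length ≤ j := by omega
    rw [List.drop_eq_nil_of_le hj]
    rfl
termination_by raw.length - j

theorem pvALoop_eq_ref (raw : List Char) (i : Nat) (parts : List String) (buf : List Char) :
    pvALoop raw i parts buf = pvRef (List.drop i raw) parts buf := by
  rw [pvALoop]
  split
  · next h =>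
    rw [List.drop_eq_getElem_cons h, pvRef]
    have hla : PySem.Chars.lower (PySem.List.slice raw (some ((pvSkipWs raw (i + 1) : Nat) : Int))
          (some (((pvSkipWs raw (i + 1) : Nat) : Int) + 8)))
        = PySem.Chars.lower (List.take 8 (List.dropWhile PySem.Chars.isspace (List.drop (i + 1) raw))) := by
      rw [show ((pvSkipWs raw (i + 1) : Nat) : Int) + 8
            = ((pvSkipWs raw (i + 1) : Nat) : Int) + ((8 : Nat) : Int) from by push_cast; ring]
      rw [PySem.List.slice_natCast_add, pvSkipWs_drop]
    have hcond : pvSw (PySem.Chars.lower (PySem.List.slice raw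
        (some ((pvSkipWs raw (i + 1) : Nat) : Int))
        (some (((pvSkipWs raw (i + 1) : Nat) : Int) + 8))))
        = pvChkStream (List.drop (i + 1) raw) := by
      rw [hla]; rfl
    by_cases hc : raw[i] = ','
    · by_cases hb : pvChkStream (List.drop (i + 1) raw) = true
      · simp only [hc, hcond, hb, if_true, decide_true, Bool.true_and]
        exact pvALoop_eq_ref raw (i + 1) _ []
      · rw [Bool.not_eq_true] at hb
        simp only [hc, hcond, hb, Bool.false_eq_true, if_false, decide_true, Bool.true_and,
          ite_true]
        exact pvALoop_eq_ref raw (i + 1) parts (buf ++ [','])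
    · simp only [if_neg hc]
      rw [if_neg (by simp [hc])]
      exact pvALoop_eq_ref raw (i + 1) parts (buf ++ [raw[i]])
  · next h =>
    rw [List.drop_eq_nil_of_le (by omega)]
    rfl
termination_by raw.length - i

def pvTailJoin (ss : List (List Char)) : List Char := (ss.map (',' :: ·)).flatten

theorem pvSplitComma_ne_nil (cs : List Char) : pvSplitComma cs ≠ [] := by
  cases cs with
  | nil => simp [pvSplitComma]
  | cons c rest =>
    unfold pvSplitComma
    split_ifs
    · simp
    · cases h : pvSplitComma rest <;> simp

theorem pvSplitComma_join (cs : List Char) (s : List Char) (ss : List (List Char))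
    (h : pvSplitComma cs = s :: ss) : cs = s ++ pvTailJoin ss := by
  induction cs generalizing s ss with
  | nil =>
    simp [pvSplitComma] at h
    rcases h with ⟨rfl, rfl⟩
    simp [pvTailJoin]
  | cons c rest ih =>
    by_cases hc : c = ','
    · subst hc
      rw [show pvSplitComma (',' :: rest) = [] :: pvSplitComma rest from by
        simp [pvSplitComma]] at h
      cases hrest : pvSplitComma rest with
      | nil => exact absurd hrest (pvSplitComma_ne_nil rest)
      | cons s' ss' =>
        rw [hrest] at h
        injection h with h1 h2
        subst h1; subst h2
        have := ih s' ss' hrest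
        simp [pvTailJoin] at this ⊢
        exact this
    · rw [show pvSplitComma (c :: rest) =
          (match pvSplitComma rest with
           | [] => [[c]]
           | s :: ss => (c :: s) :: ss) from by
        simp [pvSplitComma, hc]] at h
      cases hrest : pvSplitComma rest with
      | nil => exact absurd hrest (pvSplitComma_ne_nil rest)
      | cons s' ss' =>
        rw [hrest] at h
        injection h with h1 h2
        subst h2
        rw [← h1]
        have := ih s' ss' hrest
        simp [this]

theorem pvSplitComma_comma_free (cs : List Char) (s : List Char) (hs : s ∈ pvSplitComma cs) :
    ',' ∉ s := by
  induction cs generalizing s with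
  | nil => simp [pvSplitComma] at hs; simp [hs]
  | cons c rest ih =>
    unfold pvSplitComma at hs
    split_ifs at hs with hc
    · rcases List.mem_cons.mp hs with h | h
      · simp [h]
      · exact ih s h
    · cases hrest : pvSplitComma rest with
      | nil => exact absurd hrest (pvSplitComma_ne_nil rest)
      | cons s' ss' =>
        rw [hrest] at hs
        rcases List.mem_cons.mp hs with h | h
        · subst h
          intro hmem
          rcases List.mem_cons.mp hmem with h | h
          · exact hc h.symm
          · exact ih s' (by rw [hrest]; exact List.mem_cons_self) h
        · exact ih s (by rw [hrest]; exact List.mem_cons_of_mem _ h)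

theorem pvPrefix_append (p v w : List Char) (hp : ',' ∉ p) (_hv : ',' ∉ v) :
    (p <+: v ++ ',' :: w) ↔ p <+: v := by
  constructor
  · intro h
    by_cases hl : p.length ≤ v.length
    · have heq : p = (v ++ ',' :: w).take p.length := List.prefix_iff_eq_take.mp h
      rw [List.take_append_of_le_length hl] at heq
      rw [heq]
      exact List.take_prefix _ _
    · exfalso
      have hlt : v.length < p.length := by omega
      have := h.getElem (i := v.length) hlt
      rw [List.getElem_append_right (by omega)] at this
      simp at this
      exact hp (this ▸ List.getElem_mem hlt)
  · intro h
    exact h.trans (List.prefix_append v _)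

theorem pvCharOfNat_toNat (n : Nat) (h : n < 0xd800) : (Char.ofNat n).toNat = n := by
  unfold Char.ofNat
  split
  · rfl
  · next hn => exact absurd (Or.inl h) hn

theorem pvLowerChar_comma (c : Char) (h : PySem.Chars.lowerChar c = ',') : c = ',' := by
  unfold PySem.Chars.lowerChar at h
  split_ifs at h with hup
  · exfalso
    unfold PySem.Chars.isupper at hup
    rw [Bool.and_eq_true, decide_eq_true_iff, decide_eq_true_iff] at hup
    have hA : (65 : Nat) ≤ c.toNat := by
      have h1 := hup.1
      simp only [Char.le_def] at h1
      exact h1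
    have hZ : c.toNat ≤ 90 := by
      have h2 := hup.2
      simp only [Char.le_def] at h2
      exact h2
    have hval : (Char.ofNat (c.toNat + 32)).toNat = c.toNat + 32 :=
      pvCharOfNat_toNat _ (by omega)
    have h44 : (Char.ofNat (c.toNat + 32)).toNat = 44 := by rw [h]; rfl
    omega
  · exact h

theorem pvLower_comma_free (u : List Char) (hu : ',' ∉ u) : ',' ∉ PySem.Chars.lower u := by
  intro hmem
  unfold PySem.Chars.lower at hmem
  rcases List.mem_map.mp hmem with ⟨c, hc, heq⟩
  exact hu ((pvLowerChar_comma c heq) ▸ hc)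

theorem pvSw_append (v w : List Char) (hv : ',' ∉ v) :
    pvSw (v ++ ',' :: w) = pvSw v := by
  unfold pvSw
  have key : ∀ p : List Char, ',' ∉ p →
      PySem.Chars.startswith (v ++ ',' :: w) p = PySem.Chars.startswith v p := by
    intro p hp
    unfold PySem.Chars.startswith
    by_cases h : p <+: v
    · rw [List.isPrefixOf_iff_prefix.mpr ((pvPrefix_append p v w hp hv).mpr h),
        List.isPrefixOf_iff_prefix.mpr h]
    · have h' : ¬ p <+: v ++ ',' :: w := fun hh => h ((pvPrefix_append p v w hp hv).mp hh)
      rw [Bool.eq_iff_iff]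
      simp [List.isPrefixOf_iff_prefix, h, h']
  rw [key _ (by decide), key _ (by decide), key _ (by decide)]

theorem pvChkStream_append (seg X : List Char) (hseg : ',' ∉ seg)
    (hX : X = [] ∨ ∃ t, X = ',' :: t) : pvChkStream (seg ++ X) = pvChkStream seg := by
  rcases hX with rfl | ⟨t, rfl⟩
  · simp
  · unfold pvChkStream
    have hdw : List.dropWhile PySem.Chars.isspace (seg ++ ',' :: t)
        = List.dropWhile PySem.Chars.isspace seg ++ ',' :: t := by
      rw [List.dropWhile_append]
      split
      · next hE =>
        have h0 : List.dropWhile PySem.Chars.isspace seg = [] := by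
          simpa [List.isEmpty_iff] using hE
        rw [h0, List.dropWhile_cons, if_neg (by decide)]
        rfl
      · rfl
    rw [hdw]
    set u := List.dropWhile PySem.Chars.isspace seg with hu
    have hu_free : ',' ∉ u := fun hm => hseg ((List.dropWhile_sublist _).subset hm)
    by_cases hlen : 8 ≤ u.length
    · rw [List.take_append_of_le_length hlen]
    · have h1 : List.take 8 (u ++ ',' :: t) = u ++ ',' :: List.take (8 - u.length - 1) t := by
        rw [List.take_append]
        congr 1
        · exact List.take_of_length_le (by omega)
        · rw [List.take_cons (by omega)]
      have h2 : List.take 8 u = u := List.take_of_length_le (by omega)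
      rw [h1, h2]
      have hlow : PySem.Chars.lower (u ++ ',' :: List.take (8 - u.length - 1) t)
          = PySem.Chars.lower u ++ ',' :: PySem.Chars.lower (List.take (8 - u.length - 1) t) := by
        simp only [PySem.Chars.lower, List.map_append, List.map_cons]
        rw [show PySem.Chars.lowerChar ',' = ',' from by decide]
      rw [hlow, pvSw_append _ _ (pvLower_comma_free u hu_free)]

theorem pvRef_eq_b (cs : List Char) (parts : List String) (buf : List Char) :
    pvRef cs parts buf =
      (match pvSplitComma cs with
       | [] => []
       | s :: ss => pvBLoop ss parts (buf ++ s)) := by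
  induction cs generalizing parts buf with
  | nil => simp [pvRef, pvSplitComma, pvBLoop]
  | cons c rest ih =>
    by_cases hc : c = ','
    · subst hc
      rw [show pvSplitComma (',' :: rest) = [] :: pvSplitComma rest from by
        simp [pvSplitComma]]
      cases hrest : pvSplitComma rest with
      | nil => exact absurd hrest (pvSplitComma_ne_nil rest)
      | cons s ss =>
        have hjoin : rest = s ++ pvTailJoin ss := pvSplitComma_join rest s ss hrest
        have hfree : ',' ∉ s :=
          pvSplitComma_comma_free rest s (by rw [hrest]; exact List.mem_cons_self)
        have hshape : pvTailJoin ss = [] ∨ ∃ t, pvTailJoin ss = ',' :: t := by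
          cases ss with
          | nil => left; rfl
          | cons a as => right; exact ⟨a ++ pvTailJoin as, by simp [pvTailJoin]⟩
        have hchk : pvChkStream rest = pvChk s := by
          rw [hjoin, pvChkStream_append s _ hfree hshape, pvChk_eq]
        simp only [pvRef, List.append_nil]
        rw [hchk]
        by_cases hb : pvChk s = true
        · rw [if_pos (by simp [hb])]
          rw [ih, hrest]
          simp only [pvBLoop, hb, if_true]
          rfl
        · rw [if_neg (by simp [hb])]
          rw [ih, hrest]
          simp only [pvBLoop, hb]
          simp
    · rw [show pvSplitComma (c :: rest) =
          (match pvSplitComma rest with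
           | [] => [[c]]
           | s :: ss => (c :: s) :: ss) from by
        simp [pvSplitComma, hc]]
      cases hrest : pvSplitComma rest with
      | nil => exact absurd hrest (pvSplitComma_ne_nil rest)
      | cons s ss =>
        rw [show pvRef (c :: rest) parts buf = pvRef rest parts (buf ++ [c]) from by
          simp [pvRef, hc]]
        rw [ih, hrest]
        simp

-- ===== VERDICT (by name: the statement is the Claim_ definition above) =====
theorem split_srcset_py_spec : Claim_equal_split_srcset_py := by
  intro srcset _
  unfold Spec_split_srcset_py split_srcset_py split_srcset_py_alt
  rw [show (0 : Nat) = 0 from rfl, pvALoop_eq_ref, List.drop_zero, pvRef_eq_b]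
  cases h : pvSplitComma srcset.toList with
  | nil => rfl
  | cons s ss => simp
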